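-- pv_equiv track=rewrite | github.com/Tomas1307/ANTI-SPOOFING-VOICE-LATIN-AMERICA | app/cloner/speaker_encoder.py | _group_speakers_by_metadata
-- ===== SOURCE A (Python) =====
-- from typing import Dict, Optional, List
--
-- def _group_speakers_by_metadata(speaker_ids: List[str]) -> Dict[str, List[str]]:
--     """
--     Organize speakers into groups based on country and gender metadata.
--
--     This method parses speaker IDs to extract country and gender information,
--     grouping speakers for organized processing and progress tracking.
--
--     Args:
--         speaker_ids: List of speaker IDs in format {country}{gender}_id.
--
--     Returns:
--         Dictionary mapping group names (e.g., "Argentina Female") to lists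
--         of speaker IDs belonging to that group.
--     """
--     country_map = {
--         "ar": "Argentina",
--         "cl": "Chile",
--         "co": "Colombia",
--         "pe": "Peru",
--         "ve": "Venezuela"
--     }
--
--     gender_map = {
--         "f": "Female",
--         "m": "Male"
--     }
--
--     groups = {}
--
--     for speaker_id in speaker_ids:
--         if len(speaker_id) >= 3:
--             country_code = speaker_id[:2]
--             gender_code = speaker_id[2]
--
--             country = country_map.get(country_code, "Unknown")
--             gender = gender_map.get(gender_code, "Unknown")
--
--             group_name = f"{country} {gender}"
--         else:
--             group_name = "Unknown"
--
--         if group_name not in groups: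
--             groups[group_name] = []
--
--         groups[group_name].append(speaker_id)
--
--     return dict(sorted(groups.items()))
-- ===== SOURCE B (Python) =====
-- from typing import Dict, List
--
--
-- def _group_speakers_by_metadata(speaker_ids: List[str]) -> Dict[str, List[str]]:
--     """Sort-then-scan regrouping: tag each id with its group name, stably sort
--     the (group, id) pairs by group, then collect contiguous runs."""
--     country_map = {
--         "ar": "Argentina",
--         "cl": "Chile",
--         "co": "Colombia",
--         "pe": "Peru",
--         "ve": "Venezuela"
--     }
--     gender_map = {"f": "Female", "m": "Male"}
--
--     def group_name(sid: str) -> str: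
--         if len(sid) < 3:
--             return "Unknown"
--         return f"{country_map.get(sid[:2], 'Unknown')} {gender_map.get(sid[2], 'Unknown')}"
--
--     pairs = sorted(((group_name(s), s) for s in speaker_ids), key=lambda t: t[0])
--     out: Dict[str, List[str]] = {}
--     i, n = 0, len(pairs)
--     while i < n:
--         k = pairs[i][0]
--         j = i
--         while j < n and pairs[j][0] == k:
--             j += 1
--         out[k] = [s for _, s in pairs[i:j]]
--         i = j
--     return out
-- ===== Notes on version B (the rewrite author's own statement) =====
-- stated objective: alternative
-- what changed: Replaces the dict-accumulation loop followed by a final sort of the items with a sort-then-scan pipeline: tag every id with its group name, stably sort the (group, id) pairs by group, and collect contiguous runs into the dict.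
import Mathlib
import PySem

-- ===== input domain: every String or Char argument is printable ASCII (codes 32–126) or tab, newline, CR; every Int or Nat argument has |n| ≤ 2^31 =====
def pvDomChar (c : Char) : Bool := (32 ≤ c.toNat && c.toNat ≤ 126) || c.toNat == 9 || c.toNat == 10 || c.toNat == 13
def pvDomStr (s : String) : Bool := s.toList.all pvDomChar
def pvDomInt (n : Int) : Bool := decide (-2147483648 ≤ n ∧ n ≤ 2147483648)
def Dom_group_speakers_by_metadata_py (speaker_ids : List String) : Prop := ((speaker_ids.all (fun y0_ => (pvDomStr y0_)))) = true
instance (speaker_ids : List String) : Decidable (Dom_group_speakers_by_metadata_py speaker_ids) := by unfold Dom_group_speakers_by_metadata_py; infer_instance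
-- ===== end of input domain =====

-- B replaces A's dict-accumulation loop + final sort of the items by a sort-then-scan pipeline
-- (tag each id with its group name, stable-sort the pairs by group, collect contiguous runs): alternative decomposition, same cost.

-- ===== PORT A =====
-- the two literal lookup tables (shared constants; used by both ports' key computation)
def pvCountryMap : PySem.Dict String String :=
  PySem.Dict.ofList [("ar", "Argentina"), ("cl", "Chile"), ("co", "Colombia"), ("pe", "Peru"), ("ve", "Venezuela")]

-- speaker_id[2] is a one-character string in Python; it is ported as the Char it holds, with the gender table keyed by Char (exact: its keys are single chars)
def pvGenderMap : PySem.Dict Char String :=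
  PySem.Dict.ofList [('f', "Female"), ('m', "Male")]

-- body of A's 'for' loop: group_name = country + " " + gender (f-string) or "Unknown"
def pvGroupNameA (speaker_id : String) : String :=
  if 3 ≤ PySem.Str.len speaker_id then
    (pvCountryMap.getD (PySem.Str.slice speaker_id none (some 2)) "Unknown") ++ " " ++
      ((PySem.Str.pyGet? speaker_id 2).elim "Unknown" (fun c => pvGenderMap.getD c "Unknown"))
  else "Unknown"

-- dict keys are unique, so Python's tuple comparison in sorted(groups.items()) is decided by the first component alone
def group_speakers_by_metadata_py (speaker_ids : List String) : List (String × List String) :=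
  let groups := speaker_ids.foldl
    (fun groups speaker_id =>
      let group_name := pvGroupNameA speaker_id
      let groups := if groups.contains group_name then groups else groups.insert group_name []
      groups.insert group_name (groups.getD group_name [] ++ [speaker_id]))
    PySem.Dict.empty
  PySem.List.sorted groups.items (fun p => p.1)

-- ===== PORT B =====
-- Source B's local helper group_name(sid)
def pvGroupNameB (sid : String) : String :=
  if PySem.Str.len sid < 3 then "Unknown"
  else
    (pvCountryMap.getD (PySem.Str.slice sid none (some 2)) "Unknown") ++ " " ++
      ((PySem.Str.pyGet? sid 2).elim "Unknown" (fun c => pvGenderMap.getD c "Unknown"))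

-- Source B's run-collecting index scan (the while loops): each step takes the maximal prefix sharing the first key
def pvRuns : List (String × String) → List (String × List String)
  | [] => []
  | (k, s) :: rest =>
    (k, s :: (rest.takeWhile (fun t => t.1 == k)).map (fun t => t.2)) ::
      pvRuns (rest.dropWhile (fun t => t.1 == k))
termination_by l => l.length
decreasing_by
  simp only [List.length_cons]
  exact Nat.lt_succ_of_le (List.length_dropWhile_le _ _)

def group_speakers_by_metadata_py_alt (speaker_ids : List String) : List (String × List String) :=
  pvRuns (PySem.List.sorted (speaker_ids.map (fun s => (pvGroupNameB s, s))) (fun t => t.1))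

-- ===== PRECONDITION & SPEC =====
def Spec_group_speakers_by_metadata_py (speaker_ids : List String) (out : List (String × List String)) : Prop := out = group_speakers_by_metadata_py_alt speaker_ids
instance (speaker_ids : List String) (out : List (String × List String)) : Decidable (Spec_group_speakers_by_metadata_py speaker_ids out) := by unfold Spec_group_speakers_by_metadata_py; infer_instance

-- ===== CLAIM (what is proved, stated in full; the proofs are below) =====
def Claim_equal_group_speakers_by_metadata_py : Prop := ∀ (speaker_ids : List String), Dom_group_speakers_by_metadata_py speaker_ids → Spec_group_speakers_by_metadata_py speaker_ids (group_speakers_by_metadata_py speaker_ids)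

-- ===== LEMMAS AND PROOFS =====

-- the two ports compute the same group name
theorem pvGroupNameB_eq (s : String) : pvGroupNameB s = pvGroupNameA s := by
  unfold pvGroupNameA pvGroupNameB
  split_ifs with h1 h2 h2 <;> first | rfl | omega

-- the canonical value both ports are reduced to
def pvCanon (xs : List String) : List (String × List String) :=
  (PySem.List.sorted (PySem.List.dedup (xs.map pvGroupNameA)) (fun c => c)).map
    (fun c => (c, xs.filter (fun s => pvGroupNameA s == c)))

-- dedup peels off its head
theorem pv_dedup_cons {α : Type} [BEq α] [LawfulBEq α] (x : α) (l : List α) :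
    PySem.List.dedup (x :: l) = x :: (PySem.List.dedup l).filter (fun y => !(y == x)) := by
  rw [PySem.List.dedup_eq_ofList, PySem.Set.ofList_cons]
  simp [PySem.Set.discard]

-- dedup commutes with filter
theorem pv_dedup_filter {α : Type} [BEq α] [LawfulBEq α] (p : α → Bool) (l : List α) :
    PySem.List.dedup (l.filter p) = (PySem.List.dedup l).filter p := by
  induction l with
  | nil => simp
  | cons x t ih =>
    by_cases hp : p x = true
    · rw [List.filter_cons_of_pos hp, pv_dedup_cons, pv_dedup_cons, ih,
        List.filter_cons_of_pos hp, List.filter_comm]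
    · rw [List.filter_cons_of_neg hp, pv_dedup_cons, ih, List.filter_cons_of_neg hp,
        List.filter_comm]
      symm
      rw [List.filter_eq_self]
      intro a ha
      have h2 := (List.mem_filter.mp ha).2
      by_cases hax : a = x
      · subst hax; exact absurd h2 hp
      · simp [hax]

-- dedup is a sublist
theorem pv_dedup_sublist {α : Type} [BEq α] [LawfulBEq α] (l : List α) :
    (PySem.List.dedup l).Sublist l := by
  induction l with
  | nil => simp
  | cons x t ih =>
    rw [pv_dedup_cons]
    exact List.Sublist.cons₂ x (List.Sublist.trans (List.filter_sublist) ih)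

-- nondecreasing list ⇒ dedup strictly increasing
theorem pv_dedup_pairwise_lt {κ : Type} [LinearOrder κ] [BEq κ] [LawfulBEq κ] (l : List κ)
    (h : l.Pairwise (· ≤ ·)) : (PySem.List.dedup l).Pairwise (· < ·) := by
  have h1 : (PySem.List.dedup l).Pairwise (· ≤ ·) := h.sublist (pv_dedup_sublist l)
  have h2 : (PySem.List.dedup l).Pairwise (· ≠ ·) := PySem.List.nodup_dedup l
  exact (h1.and h2).imp (fun hab => lt_of_le_of_ne hab.1 hab.2)

-- filtering one key class through a single stable insertion step
theorem pv_filter_insertBy {α κ : Type} [LinearOrder κ] [BEq κ] [LawfulBEq κ]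
    (key : α → κ) (c : κ) (x : α) (ys : List α) (h : ys.Pairwise (fun a b => key a ≤ key b)) :
    (PySem.List.insertBy (fun a b => decide (key a < key b)) x ys).filter (fun z => key z == c) =
      ys.filter (fun z => key z == c) ++ (if key x == c then [x] else []) := by
  induction ys with
  | nil => simp [PySem.List.insertBy]; split <;> simp_all
  | cons y t ih =>
    rw [PySem.List.insertBy]
    by_cases hlt : key x < key y
    · rw [if_pos (by simpa using hlt)]
      by_cases hc : key x == c
      · -- c = key x < key y ≤ every key in t : the old list has no element of class c
        have hc' : key x = c := by simpa using hc
        have hnone : (y :: t).filter (fun z => key z == c) = [] := by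
          rw [List.filter_eq_nil_iff]
          intro a ha
          have hya : key y ≤ key a := by
            rcases List.mem_cons.mp ha with ha | ha
            · exact ha ▸ le_refl _
            · exact (List.pairwise_cons.mp h).1 a ha
          have hcy : c < key y := hc' ▸ hlt
          have : key a ≠ c := ne_of_gt (lt_of_lt_of_le hcy hya)
          simpa using this
        rw [List.filter_cons_of_pos (by simpa using hc), hnone, hc]
        simp
      · rw [List.filter_cons_of_neg (by simpa using hc), if_neg (by simpa using hc)]
        simp
    · rw [if_neg (by simpa using hlt)]
      have ih' := ih (List.pairwise_cons.mp h).2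
      by_cases hy : key y == c
      · rw [List.filter_cons_of_pos (by simpa using hy), List.filter_cons_of_pos (by simpa using hy), ih']
        simp
      · rw [List.filter_cons_of_neg (by simpa using hy), List.filter_cons_of_neg (by simpa using hy), ih']

-- STABILITY of Python's sort: each key class keeps its original order
theorem pv_filter_sorted {α κ : Type} [LinearOrder κ] [BEq κ] [LawfulBEq κ]
    (key : α → κ) (c : κ) (l : List α) :
    (PySem.List.sorted l key).filter (fun z => key z == c) = l.filter (fun z => key z == c) := by
  induction l using List.reverseRecOn with
  | nil => simp [PySem.List.sorted]
  | append_singleton t x ih =>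
    have hstep : PySem.List.sorted (t ++ [x]) key =
        PySem.List.insertBy (fun a b => decide (key a < key b)) x (PySem.List.sorted t key) := by
      rw [PySem.List.sorted_eq_foldl_insertBy, PySem.List.sorted_eq_foldl_insertBy, List.foldl_append]
      rfl
    rw [hstep, pv_filter_insertBy key c x _ (PySem.List.sorted_pairwise t key), ih,
      List.filter_append]
    congr 1
    by_cases hc : key x == c <;> simp [hc]

-- the run scan on a list nondecreasing in the first component produces one entry per distinct key
theorem pv_runs_spec (ys : List (String × String)) (h : ys.Pairwise (fun a b => a.1 ≤ b.1)) :
    pvRuns ys = (PySem.List.dedup (ys.map (fun t => t.1))).map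
      (fun c => (c, (ys.filter (fun t => t.1 == c)).map (fun t => t.2))) := by
  induction ys using pvRuns.induct with
  | case1 => simp [pvRuns]
  | case2 k s rest ih =>
    have hpair := List.pairwise_cons.mp h
    have hk : ∀ t ∈ rest, k ≤ t.1 := fun t ht => hpair.1 t ht
    set run := rest.takeWhile (fun t => t.1 == k) with hrun_def
    set rest2 := rest.dropWhile (fun t => t.1 == k) with hrest2_def
    have hsplit : run ++ rest2 = rest := List.takeWhile_append_dropWhile
    have hrun : ∀ t ∈ run, t.1 = k := fun t ht => by
      simpa using List.mem_takeWhile_imp ht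
    have hrest2p : rest2.Pairwise (fun a b => a.1 ≤ b.1) :=
      hpair.2.sublist (List.dropWhile_sublist _)
    have hrest2 : ∀ t ∈ rest2, k < t.1 := by
      intro t ht
      cases hr2 : rest2 with
      | nil => rw [hr2] at ht; simp at ht
      | cons b l' =>
        have heq : rest.dropWhile (fun t => t.1 == k) = b :: l' := by rw [← hrest2_def]; exact hr2
        have hb : (b.1 == k) = false := by
          have hne : rest.dropWhile (fun t => t.1 == k) ≠ [] := by simp [heq]
          have := List.head_dropWhile_not (l := rest) (fun t => t.1 == k) hne
          simp only [heq, List.head_cons] at this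
          exact this
        have hbk : k < b.1 := by
          have hbmem : b ∈ rest := (List.dropWhile_sublist _).mem (by rw [← hrest2_def, hr2]; simp)
          have hbne : b.1 ≠ k := by simpa using hb
          exact lt_of_le_of_ne (hk b hbmem) (Ne.symm hbne)
        rw [hr2] at ht
        rcases List.mem_cons.mp ht with ht | ht
        · exact ht ▸ hbk
        · exact lt_of_lt_of_le hbk ((List.pairwise_cons.mp (hr2 ▸ hrest2p)).1 t ht)
    -- dedup of the key list
    have hmap : ((k, s) :: rest).map (fun t => t.1) = k :: (run.map (fun t => t.1) ++ rest2.map (fun t => t.1)) := by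
      rw [← List.map_append, hsplit]; rfl
    have hded : PySem.List.dedup (((k, s) :: rest).map (fun t => t.1)) =
        k :: PySem.List.dedup (rest2.map (fun t => t.1)) := by
      rw [hmap, pv_dedup_cons, ← pv_dedup_filter]
      congr 2
      rw [List.filter_append]
      have h1 : (run.map (fun t => t.1)).filter (fun y => !(y == k)) = [] := by
        rw [List.filter_eq_nil_iff]
        intro a ha
        obtain ⟨t, ht, rfl⟩ := List.mem_map.mp ha
        simp [hrun t ht]
      have h2 : (rest2.map (fun t => t.1)).filter (fun y => !(y == k)) = rest2.map (fun t => t.1) := by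
        rw [List.filter_eq_self]
        intro a ha
        obtain ⟨t, ht, rfl⟩ := List.mem_map.mp ha
        simp [ne_of_gt (hrest2 t ht)]
      rw [h1, h2, List.nil_append]
    -- the filter at the head key
    have hfk : ((k, s) :: rest).filter (fun t => t.1 == k) = (k, s) :: run := by
      rw [List.filter_cons_of_pos (by simp), ← hsplit, List.filter_append]
      have h1 : run.filter (fun t => t.1 == k) = run :=
        List.filter_eq_self.mpr (fun t ht => by simp [hrun t ht])
      have h2 : rest2.filter (fun t => t.1 == k) = [] :=
        List.filter_eq_nil_iff.mpr (fun t ht => by simp [ne_of_gt (hrest2 t ht)])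
      rw [h1, h2, List.append_nil]
    rw [pvRuns, hded, List.map_cons, ih hrest2p, hfk]
    congr 1
    apply List.map_congr_left
    intro c hc
    obtain ⟨t0, ht0, rfl⟩ := List.mem_map.mp ((PySem.List.mem_dedup _ _).mp hc)
    have hck : ¬ (k = t0.1) := ne_of_lt (hrest2 t0 ht0)
    have hfilters : ((k, s) :: rest).filter (fun t => t.1 == t0.1) = rest2.filter (fun t => t.1 == t0.1) := by
      rw [List.filter_cons_of_neg (by simpa using hck), ← hsplit, List.filter_append]
      have h1 : run.filter (fun t => t.1 == t0.1) = [] :=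
        List.filter_eq_nil_iff.mpr (fun t ht => by
          simp [hrun t ht]
          exact hck)
      rw [h1, List.nil_append]
    rw [hfilters]

-- A's loop is dict-grouping: items are (first-occurrence key, its class) pairs
theorem pv_itemsA (xs : List String) :
    (xs.foldl
      (fun groups speaker_id =>
        let group_name := pvGroupNameA speaker_id
        let groups := if groups.contains group_name then groups else groups.insert group_name []
        groups.insert group_name (groups.getD group_name [] ++ [speaker_id]))
      PySem.Dict.empty).items =
    (PySem.List.dedup (xs.map pvGroupNameA)).map
      (fun c => (c, xs.filter (fun s => pvGroupNameA s == c))) := by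
  -- the loop body is exactly d[g] = d.get(g, []) + [s], i.e. a modify
  have hbody : ∀ (d : PySem.Dict String (List String)) (s : String),
      (let group_name := pvGroupNameA s
       let d' := if d.contains group_name then d else d.insert group_name []
       d'.insert group_name (d'.getD group_name [] ++ [s])) =
      d.modify (pvGroupNameA s) [] (fun v => v ++ [s]) := by
    intro d s
    by_cases hc : d.contains (pvGroupNameA s)
    · simp only [hc, if_pos]
      rfl
    · simp only [hc, Bool.false_eq_true, if_neg, not_false_iff]
      rw [PySem.Dict.getD_insert_self, PySem.Dict.insert_insert_self]
      rw [PySem.Dict.modify, PySem.Dict.getD_of_not_contains d [] (by simpa using hc)]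
  have hfold : xs.foldl
      (fun groups speaker_id =>
        let group_name := pvGroupNameA speaker_id
        let groups := if groups.contains group_name then groups else groups.insert group_name []
        groups.insert group_name (groups.getD group_name [] ++ [speaker_id]))
      PySem.Dict.empty =
      xs.foldl (fun d s => d.modify (pvGroupNameA s) [] (fun v => v ++ [s])) PySem.Dict.empty :=
    PySem.List.foldl_congr_mem xs _ _ PySem.Dict.empty (fun acc x _ => hbody acc x)
  rw [hfold]
  have hkeys : (xs.foldl (fun d s => d.modify (pvGroupNameA s) [] (fun v => v ++ [s]))
      PySem.Dict.empty).keys = PySem.List.dedup (xs.map pvGroupNameA) := by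
    rw [PySem.Dict.keys_foldl_modify_key xs pvGroupNameA [] (fun _ s => (fun v => v ++ [s]))
      PySem.Dict.empty]
    simp [PySem.Set.update_nil_left]
  have hnodup : (xs.foldl (fun d s => d.modify (pvGroupNameA s) [] (fun v => v ++ [s]))
      PySem.Dict.empty).keys.Nodup :=
    PySem.Dict.nodup_keys_foldl_modify_key xs pvGroupNameA [] (fun _ s => (fun v => v ++ [s]))
      PySem.Dict.empty (by simp)
  have hgetD : ∀ c, (xs.foldl (fun d s => d.modify (pvGroupNameA s) [] (fun v => v ++ [s]))
      PySem.Dict.empty).getD c [] = xs.filter (fun s => pvGroupNameA s == c) := by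
    intro c
    have hmapfold : xs.foldl (fun d s => d.modify (pvGroupNameA s) [] (fun v => v ++ [s]))
        PySem.Dict.empty =
        (xs.map (fun s => (pvGroupNameA s, s))).foldl
          (fun d p => d.modify p.1 [] (fun v => v ++ [p.2])) PySem.Dict.empty := by
      rw [List.foldl_map]
    rw [hmapfold, PySem.Dict.getD_foldl_modify_append, List.filter_map]
    simp [Function.comp_def]
  rw [PySem.Dict.items_eq_map_keys _ hnodup [], hkeys]
  apply List.map_congr_left
  intro c _
  rw [hgetD c]

theorem pv_A_eq_canon (xs : List String) : group_speakers_by_metadata_py xs = pvCanon xs := by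
  unfold group_speakers_by_metadata_py pvCanon
  apply PySem.List.sorted_eq_of_perm_of_pairwise_lt
  · rw [pv_itemsA]
    exact (PySem.List.sorted_perm _ _ false).map _
  · apply List.pairwise_map.mpr
    have h0 := PySem.List.sorted_ofList_pairwise_lt (xs.map pvGroupNameA)
    rw [← PySem.List.dedup_eq_ofList] at h0
    exact h0

theorem pv_B_eq_canon (xs : List String) : group_speakers_by_metadata_py_alt xs = pvCanon xs := by
  unfold group_speakers_by_metadata_py_alt pvCanon
  have hBA : xs.map (fun s => (pvGroupNameB s, s)) = xs.map (fun s => (pvGroupNameA s, s)) := by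
    simp [pvGroupNameB_eq]
  rw [hBA]
  set pairs := xs.map (fun s => (pvGroupNameA s, s)) with hpairs
  set sp := PySem.List.sorted pairs (fun t => t.1) with hsp
  have hsp_pair : sp.Pairwise (fun a b => a.1 ≤ b.1) := PySem.List.sorted_pairwise _ _
  rw [pv_runs_spec sp hsp_pair]
  -- the distinct keys of the sorted pair list are sorted(dedup(keys))
  have hK_lt : (PySem.List.dedup (sp.map (fun t => t.1))).Pairwise (· < ·) :=
    pv_dedup_pairwise_lt _ (List.pairwise_map.mpr hsp_pair)
  have hmem : ∀ c, c ∈ PySem.List.dedup (sp.map (fun t => t.1)) ↔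
      c ∈ PySem.List.dedup (xs.map pvGroupNameA) := by
    intro c
    rw [PySem.List.mem_dedup, PySem.List.mem_dedup,
      ((PySem.List.sorted_perm pairs (fun t => t.1) false).map (fun t => t.1)).mem_iff, hpairs,
      List.map_map]
    rfl
  have hperm : (PySem.List.dedup (sp.map (fun t => t.1))).Perm
      (PySem.List.dedup (xs.map pvGroupNameA)) :=
    (List.perm_ext_iff_of_nodup (PySem.List.nodup_dedup _) (PySem.List.nodup_dedup _)).mpr hmem
  have hkeys : PySem.List.sorted (PySem.List.dedup (xs.map pvGroupNameA)) (fun c => c) =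
      PySem.List.dedup (sp.map (fun t => t.1)) :=
    PySem.List.sorted_eq_of_perm_of_pairwise_lt _ _ _ hperm hK_lt
  rw [hkeys]
  apply List.map_congr_left
  intro c _
  have hfil : sp.filter (fun t => t.1 == c) = pairs.filter (fun t => t.1 == c) :=
    pv_filter_sorted (fun t => t.1) c pairs
  rw [hfil, hpairs, List.filter_map]
  simp [Function.comp_def]

-- ===== VERDICT (by name: the statement is the Claim_ definition above) =====
theorem group_speakers_by_metadata_py_spec : Claim_equal_group_speakers_by_metadata_py := by
  intro xs _
  unfold Spec_group_speakers_by_metadata_py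
  rw [pv_A_eq_canon, pv_B_eq_canon]
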